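-- pv_equiv track=rewrite | github.com/yihaochen/FLASHtools | tools.py | setup_cl
-- ===== SOURCE A (Python) =====
-- def setup_cl(dirs):
--     # Set up colors and label names
--     colors = {}
--     labels = {}
--     for dirname in dirs:
--         if 'M3_h1' in dirname:
--             colors[dirname] = 'pink'
--             labels[dirname] = 'low Mach (3)'
--         elif 'h1' in dirname:
--             colors[dirname] = 'r'   #'#fc8d62'
--             labels[dirname] = 'helical'
--         elif 'h0' in dirname:
--             colors[dirname] = 'b'   #'#8da0cb'
--             labels[dirname] = 'poloidal'
--         elif 'hinf' in dirname:
--             colors[dirname] = 'g'   #'#66c2a5'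
--             labels[dirname] = 'toroidal'
--         elif 'hydro' in dirname:
--             colors[dirname] = 'k'
--             labels[dirname] = 'hydro'
--         elif 'M24_b01' in dirname:
--             colors[dirname] = 'purple'
--             labels[dirname] = 'low beta (0.01)'
--     return colors, labels
-- ===== SOURCE B (Python) =====
-- PATTERNS = (('M3_h1', 'pink', 'low Mach (3)'),
--             ('h1', 'r', 'helical'),
--             ('h0', 'b', 'poloidal'),
--             ('hinf', 'g', 'toroidal'),
--             ('hydro', 'k', 'hydro'),
--             ('M24_b01', 'purple', 'low beta (0.01)'))
--
--
-- def setup_cl(dirs):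
--     # Inverted loop order: sweep the pattern table outermost; each sweep claims
--     # the still-unclaimed dirnames containing that pattern, so earlier patterns
--     # take priority.  A final pass in dirs order rebuilds the dict ordering.
--     assignment = {}
--     for pattern, color, label in PATTERNS:
--         for d in dirs:
--             if d not in assignment and pattern in d:
--                 assignment[d] = (color, label)
--     colors = {d: assignment[d][0] for d in dirs if d in assignment}
--     labels = {d: assignment[d][1] for d in dirs if d in assignment}
--     return colors, labels
-- ===== Notes on version B (the rewrite author's own statement) =====
-- stated objective: alternative
-- what changed: Inverts the loop nesting: instead of A's single pass over dirs with a six-way if/elif chain filling two dicts, B sweeps the pattern table outermost, each sweep claiming still-unclaimed dirnames into one assignment dict, then rebuilds colors and labels in dirs order with two comprehensions.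
import Mathlib
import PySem

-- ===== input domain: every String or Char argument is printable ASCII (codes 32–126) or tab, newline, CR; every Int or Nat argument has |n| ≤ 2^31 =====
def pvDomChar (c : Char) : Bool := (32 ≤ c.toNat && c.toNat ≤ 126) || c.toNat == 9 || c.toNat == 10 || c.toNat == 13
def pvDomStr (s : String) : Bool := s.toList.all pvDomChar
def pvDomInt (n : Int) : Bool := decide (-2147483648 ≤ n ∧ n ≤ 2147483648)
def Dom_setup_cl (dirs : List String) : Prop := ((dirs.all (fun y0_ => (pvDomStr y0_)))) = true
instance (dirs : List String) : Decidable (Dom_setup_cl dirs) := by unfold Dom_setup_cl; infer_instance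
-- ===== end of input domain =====

-- B inverts the loop order: it sweeps the pattern table outermost, claiming unclaimed
-- dirnames into one assignment dict, then rebuilds the two dicts in dirs order (alternative).


-- ===== PORT A =====
-- literal transliteration of A: one loop over dirs, if/elif chain, two dicts mutated in place
def setup_cl (dirs : List String) : (List (String × String)) × (List (String × String)) :=
  let st := dirs.foldl (fun (st : PySem.Dict String String × PySem.Dict String String) dirname =>
    let (colors, labels) := st
    if PySem.Str.isIn "M3_h1" dirname then
      (colors.insert dirname "pink", labels.insert dirname "low Mach (3)")
    else if PySem.Str.isIn "h1" dirname then
      (colors.insert dirname "r", labels.insert dirname "helical")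
    else if PySem.Str.isIn "h0" dirname then
      (colors.insert dirname "b", labels.insert dirname "poloidal")
    else if PySem.Str.isIn "hinf" dirname then
      (colors.insert dirname "g", labels.insert dirname "toroidal")
    else if PySem.Str.isIn "hydro" dirname then
      (colors.insert dirname "k", labels.insert dirname "hydro")
    else if PySem.Str.isIn "M24_b01" dirname then
      (colors.insert dirname "purple", labels.insert dirname "low beta (0.01)")
    else (colors, labels)) (PySem.Dict.empty, PySem.Dict.empty)
  (st.1.items, st.2.items)

-- ===== PORT B =====
def PATTERNS : List (String × String × String) :=
  [("M3_h1", "pink", "low Mach (3)"),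
   ("h1", "r", "helical"),
   ("h0", "b", "poloidal"),
   ("hinf", "g", "toroidal"),
   ("hydro", "k", "hydro"),
   ("M24_b01", "purple", "low beta (0.01)")]

def setup_cl_alt (dirs : List String) : (List (String × String)) × (List (String × String)) :=
  -- pattern-outer claiming sweep: 'if d not in assignment and pattern in d'
  let assignment := PATTERNS.foldl (fun asg p =>
    dirs.foldl (fun (asg : PySem.Dict String (String × String)) d =>
      if !asg.contains d && PySem.Str.isIn p.1 d then asg.insert d p.2 else asg) asg)
    PySem.Dict.empty
  -- the two dict comprehensions over dirs ('if d in assignment' then subscript)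
  let colors := dirs.foldl (fun (c : PySem.Dict String String) d =>
    match assignment.get? d with
    | some v => c.insert d v.1
    | none => c) PySem.Dict.empty
  let labels := dirs.foldl (fun (l : PySem.Dict String String) d =>
    match assignment.get? d with
    | some v => l.insert d v.2
    | none => l) PySem.Dict.empty
  (colors.items, labels.items)

-- ===== PRECONDITION & SPEC =====
def Spec_setup_cl (dirs : List String) (out : (List (String × String)) × (List (String × String))) : Prop := out = setup_cl_alt dirs
instance (dirs : List String) (out : (List (String × String)) × (List (String × String))) : Decidable (Spec_setup_cl dirs out) := by unfold Spec_setup_cl; infer_instance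

-- ===== CLAIM =====
def Claim_equal_setup_cl : Prop := ∀ (dirs : List String), Dom_setup_cl dirs → Spec_setup_cl dirs (setup_cl dirs)

-- ===== LEMMAS AND PROOFS =====

-- first pattern of ps occurring in d (the priority rule both programs realize)
def firstMatch (ps : List (String × String × String)) (d : String) : Option (String × String) :=
  ps.findSome? (fun p => if PySem.Str.isIn p.1 d then some p.2 else none)

-- A's if/elif step on one dirname inserts exactly what firstMatch PATTERNS prescribes
theorem step_eq_firstMatch (colors labels : PySem.Dict String String) (d : String) :
    (if PySem.Str.isIn "M3_h1" d then
      (colors.insert d "pink", labels.insert d "low Mach (3)")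
    else if PySem.Str.isIn "h1" d then
      (colors.insert d "r", labels.insert d "helical")
    else if PySem.Str.isIn "h0" d then
      (colors.insert d "b", labels.insert d "poloidal")
    else if PySem.Str.isIn "hinf" d then
      (colors.insert d "g", labels.insert d "toroidal")
    else if PySem.Str.isIn "hydro" d then
      (colors.insert d "k", labels.insert d "hydro")
    else if PySem.Str.isIn "M24_b01" d then
      (colors.insert d "purple", labels.insert d "low beta (0.01)")
    else (colors, labels)) =
    (match firstMatch PATTERNS d with
     | some cl => colors.insert d cl.1
     | none => colors,
     match firstMatch PATTERNS d with
     | some cl => labels.insert d cl.2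
     | none => labels) := by
  simp only [firstMatch, PATTERNS, List.findSome?]
  split_ifs <;> rfl

-- A's fold yields, componentwise, the dirs-order fold driven by firstMatch
theorem fold_pair_eq (dirs : List String) (colors labels : PySem.Dict String String) :
    dirs.foldl (fun (st : PySem.Dict String String × PySem.Dict String String) dirname =>
      let (colors, labels) := st
      if PySem.Str.isIn "M3_h1" dirname then
        (colors.insert dirname "pink", labels.insert dirname "low Mach (3)")
      else if PySem.Str.isIn "h1" dirname then
        (colors.insert dirname "r", labels.insert dirname "helical")
      else if PySem.Str.isIn "h0" dirname then
        (colors.insert dirname "b", labels.insert dirname "poloidal")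
      else if PySem.Str.isIn "hinf" dirname then
        (colors.insert dirname "g", labels.insert dirname "toroidal")
      else if PySem.Str.isIn "hydro" dirname then
        (colors.insert dirname "k", labels.insert dirname "hydro")
      else if PySem.Str.isIn "M24_b01" dirname then
        (colors.insert dirname "purple", labels.insert dirname "low beta (0.01)")
      else (colors, labels)) (colors, labels) =
    (dirs.foldl (fun (c : PySem.Dict String String) d =>
      match firstMatch PATTERNS d with
      | some cl => c.insert d cl.1
      | none => c) colors,
     dirs.foldl (fun (l : PySem.Dict String String) d =>
      match firstMatch PATTERNS d with
      | some cl => l.insert d cl.2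
      | none => l) labels) := by
  induction dirs generalizing colors labels with
  | nil => rfl
  | cons d rest ih =>
    simp only [List.foldl]
    rw [step_eq_firstMatch]
    exact ih _ _

-- one claiming sweep with an arbitrary test q: get? after the inner fold
theorem get?_inner (q : String → Bool) (v : String × String) (ds : List String)
    (asg : PySem.Dict String (String × String)) (x : String) :
    (ds.foldl (fun (asg : PySem.Dict String (String × String)) d =>
      if !asg.contains d && q d then asg.insert d v else asg) asg).get? x =
    (match asg.get? x with
     | some w => some w
     | none => if x ∈ ds ∧ q x then some v else none) := by
  induction ds generalizing asg with
  | nil => cases h : asg.get? x <;> simp [h]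
  | cons d rest ih =>
    simp only [List.foldl]
    by_cases hb : (!asg.contains d && q d) = true
    · rw [if_pos hb, ih]
      have hd : asg.get? d = none := by
        have h1 := (Bool.and_eq_true _ _).mp hb |>.1
        rw [Bool.not_eq_eq_eq_not, Bool.not_true, PySem.Dict.contains_eq_isSome_get?] at h1
        cases h : asg.get? d with
        | none => rfl
        | some w => rw [h] at h1; simp at h1
      have hmd : q d = true := ((Bool.and_eq_true _ _).mp hb).2
      by_cases hx : x = d
      · subst hx
        rw [PySem.Dict.get?_insert_self, hd]
        simp [List.mem_cons, hmd]
      · rw [PySem.Dict.get?_insert_of_ne _ _ hx]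
        cases h : asg.get? x with
        | some w => rfl
        | none => simp [List.mem_cons, hx]
    · rw [if_neg hb, ih]
      cases h : asg.get? x with
      | some w => rfl
      | none =>
        by_cases hx : x = d
        · subst hx
          have hcon : asg.contains x = false := by
            rw [PySem.Dict.contains_eq_isSome_get?, h]; rfl
          have hm : q x = false := by
            cases hm2 : q x with
            | false => rfl
            | true => exact absurd (by rw [hcon, hm2]; rfl) hb
          simp [hm]
        · simp [List.mem_cons, hx]

-- the whole pattern-outer fold: get? equals firstMatch on members of dirs
theorem get?_outer (ps : List (String × String × String)) (dirs : List String)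
    (asg : PySem.Dict String (String × String)) (x : String) :
    (ps.foldl (fun asg p =>
      dirs.foldl (fun (asg : PySem.Dict String (String × String)) d =>
        if !asg.contains d && PySem.Str.isIn p.1 d then asg.insert d p.2 else asg) asg) asg).get? x =
    (match asg.get? x with
     | some w => some w
     | none => if x ∈ dirs then firstMatch ps x else none) := by
  induction ps generalizing asg with
  | nil => cases h : asg.get? x <;> simp [h, firstMatch]
  | cons p rest ih =>
    simp only [List.foldl]
    rw [ih, get?_inner (fun d => PySem.Str.isIn p.1 d) p.2]
    cases h : asg.get? x with
    | some w => rfl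
    | none =>
      by_cases hx : x ∈ dirs
      · simp only [hx, if_true, true_and, firstMatch, List.findSome?_cons]
        split_ifs <;> rfl
      · simp [hx]

theorem get?_assignment (dirs : List String) (x : String) :
    (PATTERNS.foldl (fun asg p =>
      dirs.foldl (fun (asg : PySem.Dict String (String × String)) d =>
        if !asg.contains d && PySem.Str.isIn p.1 d then asg.insert d p.2 else asg) asg)
      PySem.Dict.empty).get? x =
    (if x ∈ dirs then firstMatch PATTERNS x else none) := by
  rw [get?_outer]
  simp

-- ===== VERDICT =====
theorem setup_cl_spec : Claim_equal_setup_cl := by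
  intro dirs _
  show setup_cl dirs = setup_cl_alt dirs
  simp only [setup_cl, setup_cl_alt]
  rw [fold_pair_eq]
  have hc : dirs.foldl (fun (c : PySem.Dict String String) d =>
      match (PATTERNS.foldl (fun asg p =>
        dirs.foldl (fun (asg : PySem.Dict String (String × String)) d =>
          if !asg.contains d && PySem.Str.isIn p.1 d then asg.insert d p.2 else asg) asg)
        PySem.Dict.empty).get? d with
      | some v => c.insert d v.1
      | none => c) PySem.Dict.empty =
      dirs.foldl (fun (c : PySem.Dict String String) d =>
      match firstMatch PATTERNS d with
      | some cl => c.insert d cl.1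
      | none => c) PySem.Dict.empty := by
    apply PySem.List.foldl_congr_mem
    intro acc x hx
    rw [get?_assignment, if_pos hx]
  have hl : dirs.foldl (fun (l : PySem.Dict String String) d =>
      match (PATTERNS.foldl (fun asg p =>
        dirs.foldl (fun (asg : PySem.Dict String (String × String)) d =>
          if !asg.contains d && PySem.Str.isIn p.1 d then asg.insert d p.2 else asg) asg)
        PySem.Dict.empty).get? d with
      | some v => l.insert d v.2
      | none => l) PySem.Dict.empty =
      dirs.foldl (fun (l : PySem.Dict String String) d =>
      match firstMatch PATTERNS d with
      | some cl => l.insert d cl.2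
      | none => l) PySem.Dict.empty := by
    apply PySem.List.foldl_congr_mem
    intro acc x hx
    rw [get?_assignment, if_pos hx]
  rw [hc, hl]
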